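-- pv_equiv track=rewrite | github.com/tannerfokkens-maker/Counterpoignant | tests/test_thematic_recall.py | _melody
-- ===== SOURCE A (Python) =====
-- def _melody(start: int, pitch: int, intervals: list[int], dur: int = 480) -> list[tuple[int, int, int]]:
--     notes = [(start, dur, pitch)]
--     t = start + dur
--     p = pitch
--     for iv in intervals:
--         p += iv
--         notes.append((t, dur, p))
--         t += dur
--     return notes
-- ===== SOURCE B (Python) =====
-- def _melody(start: int, pitch: int, intervals: list[int], dur: int = 480) -> list[tuple[int, int, int]]:
--     prefix = [0]
--     for iv in intervals:
--         prefix.append(prefix[-1] + iv)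
--     return [(start + i * dur, dur, pitch + prefix[i]) for i in range(len(intervals) + 1)]
-- ===== Notes on version B (the rewrite author's own statement) =====
-- stated objective: alternative
-- what changed: Replaces the incremental two-accumulator append loop by a pitch prefix-sum table plus a single index-based comprehension with closed-form times start + i*dur.
import Mathlib
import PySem

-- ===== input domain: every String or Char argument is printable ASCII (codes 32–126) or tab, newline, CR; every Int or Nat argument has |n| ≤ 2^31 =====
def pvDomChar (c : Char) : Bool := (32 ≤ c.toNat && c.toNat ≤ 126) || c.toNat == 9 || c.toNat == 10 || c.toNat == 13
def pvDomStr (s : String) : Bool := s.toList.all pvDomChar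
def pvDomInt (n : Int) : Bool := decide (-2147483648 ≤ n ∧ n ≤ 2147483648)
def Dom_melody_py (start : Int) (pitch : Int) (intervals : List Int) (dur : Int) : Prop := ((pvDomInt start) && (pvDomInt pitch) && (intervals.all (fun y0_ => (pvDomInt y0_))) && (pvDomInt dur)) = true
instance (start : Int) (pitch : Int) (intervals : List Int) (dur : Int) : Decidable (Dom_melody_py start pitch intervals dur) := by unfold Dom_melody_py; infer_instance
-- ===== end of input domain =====

-- B replaces A's incremental append loop by a prefix-sum table and a closed-form index comprehension (alternative decomposition, same cost).

-- ===== PORT A =====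
-- A's loop: state (notes, t, p), appending (t, dur, p+iv) each step
def melody_py (start : Int) (pitch : Int) (intervals : List Int) (dur : Int) : List (Int × Int × Int) :=
  (intervals.foldl
    (fun (st : List (Int × Int × Int) × Int × Int) iv =>
      let p := st.2.2 + iv
      (st.1 ++ [(st.2.1, dur, p)], st.2.1 + dur, p))
    ([(start, dur, pitch)], start + dur, pitch)).1

-- ===== PORT B =====
-- Source B's prefix loop: appends prefix[-1] + iv; ported as recursion carrying the last element
def pvBuildPrefix : Int → List Int → List Int
  | _, [] => []
  | last, iv :: rest => (last + iv) :: pvBuildPrefix (last + iv) rest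

def melody_py_alt (start : Int) (pitch : Int) (intervals : List Int) (dur : Int) : List (Int × Int × Int) :=
  let pfx := 0 :: pvBuildPrefix 0 intervals
  (List.range (intervals.length + 1)).map
    (fun (i : Nat) => (start + (i : Int) * dur, dur, pitch + pfx.getD i 0))

-- ===== PRECONDITION & SPEC =====
def Spec_melody_py (start : Int) (pitch : Int) (intervals : List Int) (dur : Int) (out : List (Int × Int × Int)) : Prop := out = melody_py_alt start pitch intervals dur
instance (start : Int) (pitch : Int) (intervals : List Int) (dur : Int) (out : List (Int × Int × Int)) : Decidable (Spec_melody_py start pitch intervals dur out) := by unfold Spec_melody_py; infer_instance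

-- ===== CLAIM (what is proved, stated in full; the proofs are below) =====
def Claim_equal_melody_py : Prop := ∀ (start : Int) (pitch : Int) (intervals : List Int) (dur : Int), Dom_melody_py start pitch intervals dur → Spec_melody_py start pitch intervals dur (melody_py start pitch intervals dur)

-- ===== LEMMAS AND PROOFS =====

-- common recursive description of the tail of the melody
def pvTail (dur : Int) : Int → Int → List Int → List (Int × Int × Int)
  | _, _, [] => []
  | t, p, iv :: rest => (t, dur, p + iv) :: pvTail dur (t + dur) (p + iv) rest

theorem melody_py_eq_tail (dur : Int) (ivs : List Int) :
    ∀ (notes : List (Int × Int × Int)) (t p : Int),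
      (ivs.foldl
        (fun (st : List (Int × Int × Int) × Int × Int) iv =>
          let q := st.2.2 + iv
          (st.1 ++ [(st.2.1, dur, q)], st.2.1 + dur, q))
        (notes, t, p)).1 = notes ++ pvTail dur t p ivs := by
  induction ivs with
  | nil => intro notes t p; simp [pvTail]
  | cons iv rest ih =>
    intro notes t p
    simp only [List.foldl_cons, pvTail]
    rw [ih]
    simp

theorem pvBuildPrefix_shift (ivs : List Int) :
    ∀ c d : Int, pvBuildPrefix (c + d) ivs = (pvBuildPrefix d ivs).map (fun x => c + x) := by
  induction ivs with
  | nil => intro c d; simp [pvBuildPrefix]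
  | cons iv rest ih =>
    intro c d
    simp only [pvBuildPrefix, List.map_cons]
    have h : c + d + iv = c + (d + iv) := by ring
    rw [h, ih]

theorem pvBuildPrefix_length (a : Int) (ivs : List Int) :
    (pvBuildPrefix a ivs).length = ivs.length := by
  induction ivs generalizing a with
  | nil => simp [pvBuildPrefix]
  | cons iv rest ih => simp [pvBuildPrefix, ih]

theorem melody_py_alt_eq_tail (dur : Int) (ivs : List Int) :
    ∀ t p : Int,
      (List.range (ivs.length + 1)).map
        (fun (i : Nat) => (t + (i : Int) * dur, dur, p + (0 :: pvBuildPrefix 0 ivs).getD i 0))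
      = (t, dur, p) :: pvTail dur (t + dur) p ivs := by
  induction ivs with
  | nil => intro t p; simp [pvTail]
  | cons iv rest ih =>
    intro t p
    rw [List.range_succ_eq_map, List.map_cons, List.map_map]
    have hpre : pvBuildPrefix 0 (iv :: rest) = iv :: (pvBuildPrefix 0 rest).map (fun x => iv + x) := by
      simp only [pvBuildPrefix]
      rw [show (0 : Int) + iv = iv from by ring]
      rw [show (iv : Int) = iv + 0 from by ring, pvBuildPrefix_shift]
      simp
    have hcong :
        (List.range ((iv :: rest).length)).map
          ((fun (i : Nat) => (t + (i : Int) * dur, dur, p + ((0 : Int) :: pvBuildPrefix 0 (iv :: rest)).getD i 0)) ∘ Nat.succ)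
        = (List.range (rest.length + 1)).map
          (fun (i : Nat) => ((t + dur) + (i : Int) * dur, dur, (p + iv) + ((0 : Int) :: pvBuildPrefix 0 rest).getD i 0)) := by
      rw [List.length_cons]
      apply List.map_congr_left
      intro i hi
      have hi' : i < rest.length + 1 := List.mem_range.mp hi
      simp only [Function.comp_apply, hpre, Prod.mk.injEq]
      refine ⟨by push_cast; ring, trivial, ?_⟩
      cases i with
      | zero => simp [List.getD]
      | succ j =>
        have hj : j < (pvBuildPrefix 0 rest).length := by
          rw [pvBuildPrefix_length]; omega
        simp only [List.getD, List.getElem?_cons_succ, List.getElem?_map,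
          List.getElem?_eq_getElem hj]
        simp
        ring
    rw [hcong, ih (t + dur) (p + iv)]
    simp [pvTail]

-- ===== VERDICT (by name: the statement is the Claim_ definition above) =====
theorem melody_py_spec : Claim_equal_melody_py := by
  intro start pitch intervals dur _
  unfold Spec_melody_py melody_py melody_py_alt
  rw [melody_py_eq_tail, melody_py_alt_eq_tail]
  simp
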